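-- pv_equiv track=rewrite | github.com/caiopo/challenges | uri/1110.py | throw_away
-- ===== SOURCE A (Python) =====
-- def throw_away(n):
--     discarded = []
--     deck = list(range(1, n + 1))
--
--     while len(deck) > 1:
--         discarded.append(deck.pop(0))
--         moved = deck.pop(0)
--         deck.append(moved)
--
--     return discarded, deck[0]
-- ===== SOURCE B (Python) =====
-- def throw_away(n):
--     # Circular-index simulation: one shrinking list with a modular pointer,
--     # instead of a queue rotated by two pops and an append.
--     cards = list(range(1, n + 1))
--     discarded = []
--     i = 0
--     while len(cards) > 1:
--         discarded.append(cards.pop(i))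
--         i = (i + 1) % len(cards)
--     return discarded, cards[0]
-- ===== Notes on version B (the rewrite author's own statement) =====
-- stated objective: alternative
-- what changed: Replaces the rotating FIFO queue (pop front, pop front, append to back every round) with a single shrinking list and a modular index pointer: each round does one pop at index i and advances i = (i+1) % len(cards), never moving elements to the back.
-- outside the precondition, e.g. on throw_away(0): A raises IndexError, B raises IndexError
import Mathlib
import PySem

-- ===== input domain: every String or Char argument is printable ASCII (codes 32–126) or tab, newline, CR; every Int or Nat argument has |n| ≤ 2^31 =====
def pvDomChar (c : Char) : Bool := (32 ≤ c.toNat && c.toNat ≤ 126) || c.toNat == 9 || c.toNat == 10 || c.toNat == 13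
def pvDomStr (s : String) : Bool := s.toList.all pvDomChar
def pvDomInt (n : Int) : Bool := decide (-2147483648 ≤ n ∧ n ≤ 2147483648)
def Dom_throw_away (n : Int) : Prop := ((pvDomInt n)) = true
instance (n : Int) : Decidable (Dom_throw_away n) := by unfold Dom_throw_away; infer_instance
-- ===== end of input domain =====

-- B replaces A's rotating queue (two pops and an append per round) by one shrinking list
-- with a modular index pointer; same cost, genuinely different traversal (objective: alternative).

-- ===== PORT A =====
-- while len(deck) > 1: discarded.append(deck.pop(0)); moved = deck.pop(0); deck.append(moved)
def throwAwayLoopA : List Int → List Int → List Int × List Int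
  | disc, d0 :: d1 :: rest => throwAwayLoopA (disc ++ [d0]) (rest ++ [d1])
  | disc, deck => (disc, deck)
  termination_by _ deck => deck.length
  decreasing_by simp

def throw_away (n : Int) : List Int × Int :=
  let deck := PySem.List.pyRange 1 (n + 1) 1
  let r := throwAwayLoopA [] deck
  (r.1, PySem.List.pyGetD r.2 0 0)   -- deck[0]; Pre_ guarantees the deck is nonempty

-- ===== PORT B =====
-- while len(cards) > 1: discarded.append(cards.pop(i)); i = (i+1) % len(cards)
def throwAwayLoopB (disc cards : List Int) (i : Int) : List Int × List Int :=
  if cards.length > 1 then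
    match h : PySem.List.pop? cards i with
    | some (x, rest) =>
        throwAwayLoopB (disc ++ [x]) rest (PySem.Int.mod (i + 1) rest.length)
    | none => (disc, cards)   -- unreachable under the loop invariant 0 ≤ i < len(cards)
  else (disc, cards)
  termination_by cards.length
  decreasing_by have h2 := PySem.List.length_of_pop?_eq_some cards h; simp at h2; omega

def throw_away_alt (n : Int) : List Int × Int :=
  let cards := PySem.List.pyRange 1 (n + 1) 1
  let r := throwAwayLoopB [] cards 0
  (r.1, PySem.List.pyGetD r.2 0 0)   -- cards[0]; Pre_ guarantees nonempty

-- ===== PRECONDITION & SPEC =====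
-- Pre_ excludes exactly n ≤ 0, where A's deck[0] raises IndexError (B raises there too).
def Pre_throw_away (n : Int) : Prop := 1 ≤ n
instance (n : Int) : Decidable (Pre_throw_away n) := by unfold Pre_throw_away; infer_instance
def pvWitness_throw_away : Int := 6

def Spec_throw_away (n : Int) (out : List Int × Int) : Prop := out = throw_away_alt n
instance (n : Int) (out : List Int × Int) : Decidable (Spec_throw_away n out) := by unfold Spec_throw_away; infer_instance

-- ===== CLAIM (what is proved, stated in full; the proofs are below) =====
def Claim_equal_throw_away : Prop := ∀ (n : Int), Dom_throw_away n → Pre_throw_away n → Spec_throw_away n (throw_away n)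

-- ===== LEMMAS AND PROOFS =====

-- Invariant: A's deck is B's cards rotated by B's pointer i.
theorem throwAway_loop_eq (L : Nat) : ∀ (cards : List Int), cards.length = L →
    ∀ (i : Nat), i < cards.length → ∀ (disc : List Int),
    throwAwayLoopA disc (cards.rotate i) = throwAwayLoopB disc cards (i : Int) := by
  induction L with
  | zero => intro cards hL i hi; omega
  | succ m ih =>
    intro cards hL i hi disc
    by_cases h2 : cards.length ≤ 1
    · -- singleton: both loops stop at once
      have hi0 : i = 0 := by omega
      obtain ⟨x, hx⟩ : ∃ x, cards = [x] := by
        match cards, hL with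
        | [x], _ => exact ⟨x, rfl⟩
      subst hx hi0
      rw [List.rotate_zero]
      simp [throwAwayLoopA, throwAwayLoopB]
    · replace h2 : 1 < cards.length := by omega
      -- pop at index i
      have hpop : PySem.List.pop? cards (i : Int) = some (cards[i], cards.eraseIdx i) :=
        PySem.List.pop?_natCast cards i hi
      have hel : (cards.eraseIdx i).length = m := by
        rw [List.length_eraseIdx_of_lt hi]; omega
      have hile : i ≤ (cards.eraseIdx i).length := by omega
      -- A's deck decomposes as cards[i] :: (eraseIdx i).rotate i
      have hdeck : cards.rotate i = cards[i] :: (cards.eraseIdx i).rotate i := by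
        rw [List.rotate_eq_drop_append_take (by omega : i ≤ cards.length),
            List.rotate_eq_drop_append_take hile,
            List.eraseIdx_eq_take_drop_succ,
            List.drop_left' (by simp; omega), List.take_left' (by simp; omega),
            List.drop_eq_getElem_cons hi]
        rfl
      -- the rotated remainder is nonempty
      have hetl : ((cards.eraseIdx i).rotate i).length = m := by simp [hel]
      obtain ⟨d1, rest, hdr⟩ := List.exists_cons_of_ne_nil
        (show (cards.eraseIdx i).rotate i ≠ [] by
          intro hnil; rw [hnil] at hetl; simp at hetl; omega)
      -- one unfolding of each loop
      rw [hdeck, hdr, throwAwayLoopA, throwAwayLoopB,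
          if_pos (show cards.length > 1 by omega)]
      split
      · next x rest' hsome =>
          rw [hpop] at hsome
          simp only [Option.some.injEq, Prod.mk.injEq] at hsome
          obtain ⟨hx, hrest⟩ := hsome
          subst hx hrest
          -- rest ++ [d1] = rotate by the new (modular) pointer
          have hrot : rest ++ [d1] = (cards.eraseIdx i).rotate ((i + 1) % (cards.eraseIdx i).length) := by
            rw [List.rotate_mod, ← List.rotate_rotate, hdr, List.rotate_cons_succ,
                List.rotate_zero]
          have hmod : PySem.Int.mod ((i : Int) + 1) ((cards.eraseIdx i).length : Int)
              = (((i + 1) % (cards.eraseIdx i).length : Nat) : Int) := by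
            rw [show ((i : Int) + 1) = (((i + 1 : Nat)) : Int) by push_cast; ring]
            exact PySem.Int.mod_natCast _ _
          rw [hrot, hmod]
          exact ih _ hel _ (by rw [hel]; exact Nat.mod_lt _ (by omega)) _
      · next hnone => rw [hpop] at hnone; cases hnone

-- ===== VERDICT (by name: the statement is the Claim_ definition above) =====
theorem throw_away_spec : Claim_equal_throw_away := by
  intro n _ hn
  replace hn : 1 ≤ n := hn
  unfold Spec_throw_away throw_away throw_away_alt
  have hlen : (PySem.List.pyRange 1 (n + 1) 1).length = (n : Int).toNat := by
    rw [PySem.List.length_pyRange_one]; omega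
  have h := throwAway_loop_eq ((PySem.List.pyRange 1 (n + 1) 1).length)
      (PySem.List.pyRange 1 (n + 1) 1) rfl 0 (by rw [hlen]; omega) []
  rw [List.rotate_zero] at h
  simp only [Nat.cast_zero] at h
  simp only [h]
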